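-- pv_equiv track=rewrite | github.com/kazuhiko1979/edabit | recursion/上級_データ構造入門_キュー_課題_括弧チェック.py | diceStreakGamble
-- ===== SOURCE A (Python) =====
-- def make_score(player):
--
--     if player == []:
--         return [0, []]
--     results = [player[0]]
--
--     if len(player) == 1:
--         return [4, results]
--     for i in range(1, len(player)):
--         while results != [] and player[i-1] > player[i]:
--             results.pop()
--         results.append(player[i])
--     return [len(results) * 4, results]
--
-- def diceStreakGamble(player1, player2, player3, player4):
--
--
--     scores = [make_score(player1), make_score(player2), make_score(player3), make_score(player4)]
--
--     max_score = 0
--     max_id = 0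
--     for i, score in enumerate(scores):
--         if max_score < score[0]:
--             max_score = score[0]
--             max_id = i
--     return "Winner: Player " + str(max_id + 1) + " won $" + str(max_score) \
--            + " by rolling " + str(scores[max_id][1]).replace(" ", "")
-- ===== SOURCE B (Python) =====
-- def make_score(player):
--     if not player:
--         return [0, []]
--     k = 0
--     for i in range(1, len(player)):
--         if player[i - 1] > player[i]:
--             k = i
--     results = player[k:]
--     return [len(results) * 4, results]
--
--
-- def diceStreakGamble(player1, player2, player3, player4):
--     scores = [make_score(player1), make_score(player2), make_score(player3), make_score(player4)]
--     max_id, best = max(enumerate(scores), key=lambda t: t[1][0])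
--     return ("Winner: Player " + str(max_id + 1) + " won $" + str(best[0])
--             + " by rolling [" + ",".join(str(x) for x in best[1]) + "]")
-- ===== Notes on version B (the rewrite author's own statement) =====
-- stated objective: simpler
-- what changed: make_score's stack simulation (pop-all then append per element) is replaced by a single scan that records the index of the last strict descent and slices the tail off once, and the hand-written winner loop is replaced by max over enumerate keyed on the score (first maximum wins, matching A's strict-< update).
import Mathlib
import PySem

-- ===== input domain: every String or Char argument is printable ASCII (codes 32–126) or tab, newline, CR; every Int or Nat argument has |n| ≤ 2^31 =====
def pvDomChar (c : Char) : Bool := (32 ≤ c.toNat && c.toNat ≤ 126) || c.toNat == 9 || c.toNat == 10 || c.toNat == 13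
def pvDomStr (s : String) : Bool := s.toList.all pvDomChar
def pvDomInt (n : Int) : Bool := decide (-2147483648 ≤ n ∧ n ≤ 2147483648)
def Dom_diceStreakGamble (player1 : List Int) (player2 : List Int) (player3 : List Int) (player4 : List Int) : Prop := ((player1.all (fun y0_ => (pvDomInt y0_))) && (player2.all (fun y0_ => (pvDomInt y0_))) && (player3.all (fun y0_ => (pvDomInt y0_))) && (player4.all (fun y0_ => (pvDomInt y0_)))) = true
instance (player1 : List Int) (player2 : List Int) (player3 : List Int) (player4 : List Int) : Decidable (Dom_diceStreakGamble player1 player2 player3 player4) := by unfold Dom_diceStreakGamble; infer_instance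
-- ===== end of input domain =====

-- B replaces A's stack simulation in make_score by locating the last strict descent and slicing,
-- and replaces the hand-written winner loop by max over enumerate (objective: simpler; same behaviour).

-- ===== PORT A =====

-- inner `while results != [] and player[i-1] > player[i]: results.pop()` (the comparison is loop-invariant)
def pvPopLoop (cond : Bool) (rs : List Int) : List Int :=
  if rs ≠ [] ∧ cond then pvPopLoop cond rs.dropLast else rs
termination_by rs.length
decreasing_by
  rename_i h
  have hne : rs ≠ [] := h.1
  have hlen : rs.length ≠ 0 := fun h0 => hne (List.eq_nil_of_length_eq_zero h0)
  simp [List.length_dropLast]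
  omega

def pvMakeScore (player : List Int) : Int × List Int :=
  if player = [] then (0, [])
  else
    let results := [PySem.List.pyGetD player 0 0]
    if player.length = 1 then (4, results)
    else
      let results := (PySem.List.pyRange 1 (player.length : Int)).foldl
        (fun rs i =>
          pvPopLoop (decide (PySem.List.pyGetD player (i - 1) 0 > PySem.List.pyGetD player i 0)) rs
            ++ [PySem.List.pyGetD player i 0])
        results
      ((results.length : Int) * 4, results)

-- `str(list_of_ints).replace(" ", "")` ported by hand as its exact composite effect:
-- str(int) contains no space, so the only spaces removed are the ", " separators.
def pvRenderRollsA (rolls : List Int) : String :=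
  "[" ++ PySem.Str.join "," (rolls.map PySem.Int.toStr) ++ "]"

def diceStreakGamble (player1 : List Int) (player2 : List Int) (player3 : List Int) (player4 : List Int) : String :=
  let scores := [pvMakeScore player1, pvMakeScore player2, pvMakeScore player3, pvMakeScore player4]
  let st := (PySem.List.enumerate scores 0).foldl
    (fun (st : Int × Int) p => if st.1 < p.2.1 then (p.2.1, p.1) else st) (0, 0)
  "Winner: Player " ++ PySem.Int.toStr (st.2 + 1) ++ " won $" ++ PySem.Int.toStr st.1
    ++ " by rolling " ++ pvRenderRollsA (PySem.List.pyGetD scores st.2 (0, [])).2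

-- ===== PORT B =====

def pvMakeScoreAlt (player : List Int) : Int × List Int :=
  if player = [] then (0, [])
  else
    let k := (PySem.List.pyRange 1 (player.length : Int)).foldl
      (fun k i =>
        if PySem.List.pyGetD player (i - 1) 0 > PySem.List.pyGetD player i 0 then i else k) 0
    let results := PySem.List.slice player (some k) none
    ((results.length : Int) * 4, results)

def diceStreakGamble_alt (player1 : List Int) (player2 : List Int) (player3 : List Int) (player4 : List Int) : String :=
  let scores := [pvMakeScoreAlt player1, pvMakeScoreAlt player2, pvMakeScoreAlt player3, pvMakeScoreAlt player4]
  match PySem.List.max? (PySem.List.enumerate scores 0) (fun t => t.2.1) with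
  | some (maxId, best) =>
      "Winner: Player " ++ PySem.Int.toStr (maxId + 1) ++ " won $" ++ PySem.Int.toStr best.1
        ++ " by rolling [" ++ PySem.Str.join "," (best.2.map PySem.Int.toStr) ++ "]"
  | none => ""   -- unreachable: `scores` has four elements

-- ===== PRECONDITION & SPEC =====
def Spec_diceStreakGamble (player1 : List Int) (player2 : List Int) (player3 : List Int) (player4 : List Int) (out : String) : Prop := out = diceStreakGamble_alt player1 player2 player3 player4
instance (player1 : List Int) (player2 : List Int) (player3 : List Int) (player4 : List Int) (out : String) : Decidable (Spec_diceStreakGamble player1 player2 player3 player4 out) := by unfold Spec_diceStreakGamble; infer_instance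

-- ===== CLAIM (what is proved, stated in full; the proofs are below) =====
def Claim_equal_diceStreakGamble : Prop := ∀ (player1 : List Int) (player2 : List Int) (player3 : List Int) (player4 : List Int), Dom_diceStreakGamble player1 player2 player3 player4 → Spec_diceStreakGamble player1 player2 player3 player4 (diceStreakGamble player1 player2 player3 player4)

-- ===== LEMMAS AND PROOFS =====

theorem pvPopLoop_true (rs : List Int) : pvPopLoop true rs = [] := by
  induction rs using List.reverseRecOn with
  | nil => rw [pvPopLoop]; simp
  | append_singleton l a ih => rw [pvPopLoop]; simpa using ih

theorem pvPopLoop_false (rs : List Int) : pvPopLoop false rs = rs := by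
  rw [pvPopLoop]; simp

-- joint invariant of A's stack fold and B's last-descent fold over range(1, m)
theorem pv_folds_inv (player : List Int) (m : Nat) (h1 : 1 ≤ m) (h2 : m ≤ player.length) :
    ∃ k : Nat, (k : Int) < m ∧
      ((PySem.List.pyRange 1 (m : Int)).foldl
        (fun k i =>
          if PySem.List.pyGetD player (i - 1) 0 > PySem.List.pyGetD player i 0 then i else k) 0
        = (k : Int)) ∧
      ((PySem.List.pyRange 1 (m : Int)).foldl
        (fun rs i =>
          pvPopLoop (decide (PySem.List.pyGetD player (i - 1) 0 > PySem.List.pyGetD player i 0)) rs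
            ++ [PySem.List.pyGetD player i 0])
        [PySem.List.pyGetD player 0 0]
        = (player.drop k).take (m - k)) := by
  induction m, h1 using Nat.le_induction with
  | base =>
      obtain ⟨a, t, rfl⟩ : ∃ a t, player = a :: t := by
        cases player with
        | nil => simp at h2
        | cons a t => exact ⟨a, t, rfl⟩
      refine ⟨0, by norm_num, ?_, ?_⟩
      · rw [PySem.List.pyRange_one_eq_nil (by norm_num)]; rfl
      · rw [PySem.List.pyRange_one_eq_nil (by norm_num)]
        simp [PySem.List.pyGetD]
  | succ m hm ih =>
      obtain ⟨k, hk, hfoldK, hfoldR⟩ := ih (by omega)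
      have hcast : ((m + 1 : Nat) : Int) = (m : Int) + 1 := by push_cast; ring
      have hsplit := PySem.List.pyRange_one_succ_right (a := 1) (b := (m : Int)) (by exact_mod_cast hm)
      have hmlt : m < player.length := by omega
      have hgm : PySem.List.pyGetD player (m : Int) 0 = player[m] :=
        PySem.List.pyGetD_eq_getElem player 0 (by positivity) (by exact_mod_cast hmlt)
      by_cases hc : PySem.List.pyGetD player ((m : Int) - 1) 0 > PySem.List.pyGetD player (m : Int) 0
      · refine ⟨m, by push_cast; omega, ?_, ?_⟩
        · rw [hcast, hsplit, List.foldl_append, hfoldK, List.foldl_cons, List.foldl_nil, if_pos hc]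
        · rw [hcast, hsplit, List.foldl_append, hfoldR, List.foldl_cons, List.foldl_nil,
            decide_eq_true hc, pvPopLoop_true, hgm]
          have hget : (List.drop m player)[0]? = some player[m] := by
            rw [List.getElem?_drop]; simp [List.getElem?_eq_getElem hmlt]
          have hsub : m + 1 - m = 0 + 1 := by omega
          rw [hsub, List.take_add_one, hget]
          simp
      · refine ⟨k, by push_cast at hk ⊢; omega, ?_, ?_⟩
        · rw [hcast, hsplit, List.foldl_append, hfoldK, List.foldl_cons, List.foldl_nil, if_neg hc]
        · rw [hcast, hsplit, List.foldl_append, hfoldR, List.foldl_cons, List.foldl_nil,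
            decide_eq_false hc, pvPopLoop_false, hgm]
          have hkm : k ≤ m := by exact_mod_cast hk.le
          have h1 : m + 1 - k = (m - k) + 1 := by omega
          rw [h1, List.take_add_one, List.getElem?_drop]
          have h2' : k + (m - k) = m := by omega
          rw [h2', List.getElem?_eq_getElem hmlt]
          simp

theorem pvMakeScore_eq (player : List Int) : pvMakeScore player = pvMakeScoreAlt player := by
  unfold pvMakeScore pvMakeScoreAlt
  by_cases hnil : player = []
  · simp [hnil]
  · have hlen : 1 ≤ player.length := by
      cases player with
      | nil => exact absurd rfl hnil
      | cons a t => simp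
    rw [if_neg hnil, if_neg hnil]
    by_cases h1 : player.length = 1
    · obtain ⟨a, rfl⟩ : ∃ a, player = [a] := by
        cases player with
        | nil => exact absurd rfl hnil
        | cons a t =>
          cases t with
          | nil => exact ⟨a, rfl⟩
          | cons b u => simp at h1
      rw [if_pos h1]
      have hget : PySem.List.pyGetD [a] 0 0 = a :=
        PySem.List.pyGetD_eq_getElem [a] 0 (le_refl 0) (by norm_num)
      simp [hget, PySem.List.pyRange_one_eq_nil, PySem.List.slice_from]
    · rw [if_neg h1]
      obtain ⟨k, hk, hK, hR⟩ := pv_folds_inv player player.length hlen le_rfl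
      have htk : (player.drop k).take (player.length - k) = player.drop k :=
        List.take_of_length_le (by rw [List.length_drop])
      simp only [hK, hR, PySem.List.slice_from _ (Int.natCast_nonneg k), Int.toNat_natCast, htk]

theorem pv_winner_eq (s1 s2 s3 s4 : Int × List Int)
    (h1 : 0 ≤ s1.1) :
    (let scores := [s1, s2, s3, s4]
     let st := (PySem.List.enumerate scores 0).foldl
       (fun (st : Int × Int) p => if st.1 < p.2.1 then (p.2.1, p.1) else st) (0, 0)
     "Winner: Player " ++ PySem.Int.toStr (st.2 + 1) ++ " won $" ++ PySem.Int.toStr st.1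
       ++ " by rolling " ++ pvRenderRollsA (PySem.List.pyGetD scores st.2 (0, [])).2)
    = (let scores := [s1, s2, s3, s4]
       match PySem.List.max? (PySem.List.enumerate scores 0) (fun t => t.2.1) with
       | some (maxId, best) =>
           "Winner: Player " ++ PySem.Int.toStr (maxId + 1) ++ " won $" ++ PySem.Int.toStr best.1
             ++ " by rolling [" ++ PySem.Str.join "," (best.2.map PySem.Int.toStr) ++ "]"
       | none => "") := by
  have hbr : ∀ z : String, " by rolling " ++ ("[" ++ z) = " by rolling [" ++ z := by
    intro z; rw [← String.append_assoc]; rfl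
  have hs1 : (if (0 : Int) < s1.1 then (s1.1, (0 : Int)) else ((0 : Int), (0 : Int))) = (s1.1, 0) := by
    rcases lt_or_eq_of_le h1 with h | h
    · rw [if_pos h]
    · rw [if_neg (by omega), ← h]
  simp only [PySem.List.enumerate_cons, PySem.List.enumerate_nil, PySem.List.max?,
    List.foldl_cons, List.foldl_nil, hs1]
  norm_num
  split_ifs <;>
    simp_all [pvRenderRollsA, PySem.List.pyGetD, String.append_assoc]
  all_goals (repeat' (first | omega | rfl | (split_ifs <;> (try simp_all))))

theorem pvMakeScoreAlt_nonneg (player : List Int) : 0 ≤ (pvMakeScoreAlt player).1 := by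
  unfold pvMakeScoreAlt
  split_ifs <;> simp

-- ===== VERDICT (by name: the statement is the Claim_ definition above) =====
theorem diceStreakGamble_spec : Claim_equal_diceStreakGamble := by
  intro p1 p2 p3 p4 _
  unfold Spec_diceStreakGamble diceStreakGamble diceStreakGamble_alt
  simp only [pvMakeScore_eq]
  exact pv_winner_eq _ _ _ _ (pvMakeScoreAlt_nonneg p1)
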